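-- pv_equiv track=rewrite | github.com/slazien/cataclysm | cataclysm/corner_enrichment.py | _has_min_consecutive_true
-- ===== SOURCE A (Python) =====
-- def _has_min_consecutive_true(values: list[bool], min_run: int) -> bool:
--     run = 0
--     for is_true in values:
--         if is_true:
--             run += 1
--             if run >= min_run:
--                 return True
--         else:
--             run = 0
--     return False
-- ===== SOURCE B (Python) =====
-- from itertools import groupby
--
--
-- def _has_min_consecutive_true(values: list[bool], min_run: int) -> bool:
--     return any(key and sum(1 for _ in group) >= min_run
--                for key, group in groupby(values, key=bool))
-- ===== Notes on version B (the rewrite author's own statement) =====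
-- stated objective: idiomatic
-- what changed: Replaced the hand-maintained running counter with itertools.groupby partitioning the list into maximal truthiness runs, then any() over the run lengths.
import Mathlib
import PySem

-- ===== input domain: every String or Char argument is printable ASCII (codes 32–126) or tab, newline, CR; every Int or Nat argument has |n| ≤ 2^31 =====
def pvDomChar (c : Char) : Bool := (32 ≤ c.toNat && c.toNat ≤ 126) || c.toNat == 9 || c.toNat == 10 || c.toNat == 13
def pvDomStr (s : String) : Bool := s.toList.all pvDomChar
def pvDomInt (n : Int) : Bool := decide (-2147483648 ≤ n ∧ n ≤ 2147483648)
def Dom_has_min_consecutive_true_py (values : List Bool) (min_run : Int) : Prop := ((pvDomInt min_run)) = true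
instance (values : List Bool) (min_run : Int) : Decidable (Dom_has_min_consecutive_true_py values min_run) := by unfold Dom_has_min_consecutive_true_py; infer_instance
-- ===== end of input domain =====

-- B rewrites A's running-counter scan as groupby-into-maximal-runs + any over run lengths (idiomatic decomposition, same cost).

-- ===== PORT A =====
-- the for-loop of A with its `run` counter and early return, as structural recursion
def pvGoA (xs : List Bool) (run : Int) (min_run : Int) : Bool :=
  match xs with
  | [] => false
  | is_true :: rest =>
    if is_true then
      if run + 1 ≥ min_run then true else pvGoA rest (run + 1) min_run
    else
      pvGoA rest 0 min_run

def has_min_consecutive_true_py (values : List Bool) (min_run : Int) : Bool :=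
  pvGoA values 0 min_run

-- ===== PORT B =====
-- itertools.groupby(values, key=bool): the list of maximal runs as (key, length) pairs
def pvRunsGo (k : Bool) (n : Nat) (xs : List Bool) : List (Bool × Nat) :=
  match xs with
  | [] => [(k, n)]
  | b :: rest => if b == k then pvRunsGo k (n + 1) rest else (k, n) :: pvRunsGo b 1 rest

def pvRuns (xs : List Bool) : List (Bool × Nat) :=
  match xs with
  | [] => []
  | b :: rest => pvRunsGo b 1 rest

-- any(key and sum(1 for _ in group) >= min_run for key, group in groupby(values, key=bool))
def has_min_consecutive_true_py_alt (values : List Bool) (min_run : Int) : Bool :=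
  (pvRuns values).any (fun p => p.1 && decide ((p.2 : Int) ≥ min_run))

-- ===== PRECONDITION & SPEC =====
def Spec_has_min_consecutive_true_py (values : List Bool) (min_run : Int) (out : Bool) : Prop := out = has_min_consecutive_true_py_alt values min_run
instance (values : List Bool) (min_run : Int) (out : Bool) : Decidable (Spec_has_min_consecutive_true_py values min_run out) := by unfold Spec_has_min_consecutive_true_py; infer_instance

-- ===== CLAIM (what is proved, stated in full; the proofs are below) =====
def Claim_equal_has_min_consecutive_true_py : Prop := ∀ (values : List Bool) (min_run : Int), Dom_has_min_consecutive_true_py values min_run → Spec_has_min_consecutive_true_py values min_run (has_min_consecutive_true_py values min_run)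

-- ===== LEMMAS AND PROOFS =====

-- the first run emitted by pvRunsGo k n xs is (k, n + t) for some t
theorem pvRunsGo_first (xs : List Bool) : ∀ (k : Bool) (n : Nat),
    ∃ t tl, pvRunsGo k n xs = (k, n + t) :: tl := by
  induction xs with
  | nil => intro k n; exact ⟨0, [], rfl⟩
  | cons b rest ih =>
    intro k n
    by_cases h : b = k
    · obtain ⟨t, tl, ht⟩ := ih k (n + 1)
      exact ⟨t + 1, tl, by simp [pvRunsGo, h, ht]; omega⟩
    · refine ⟨0, pvRunsGo b 1 rest, ?_⟩
      simp [pvRunsGo]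
      intro hbk; exact absurd hbk h

-- if the current run already meets the threshold, B's check succeeds
theorem pvRunsGo_any_true (xs : List Bool) (n : Nat) (m : Int)
    (h : (n : Int) ≥ m) :
    (pvRunsGo true n xs).any (fun p => p.1 && decide ((p.2 : Int) ≥ m)) = true := by
  obtain ⟨t, tl, ht⟩ := pvRunsGo_first xs true n
  simp [ht]
  left; push_cast; omega

-- main invariant: mid-scan, with current run (k, n) and n below the threshold when k,
-- B's check of the remaining grouping equals A's loop state
theorem pvMain (rest : List Bool) : ∀ (k : Bool) (n : Nat) (m : Int),
    (k = true → (n : Int) < m) →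
    (pvRunsGo k n rest).any (fun p => p.1 && decide ((p.2 : Int) ≥ m))
      = pvGoA rest (if k then (n : Int) else 0) m := by
  induction rest with
  | nil =>
    intro k n m hk
    cases k with
    | false => simp [pvRunsGo, pvGoA]
    | true =>
      have := hk rfl
      simp [pvRunsGo, pvGoA]; omega
  | cons b rest ih =>
    intro k n m hk
    cases b with
    | true =>
      cases k with
      | true =>
        by_cases hm : (n : Int) + 1 ≥ m
        · have h1 := pvRunsGo_any_true rest (n + 1) m (by omega)
          simp [pvRunsGo, pvGoA, hm, h1]
        · have h2 := ih true (n + 1) m (by intro _; omega)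
          simp at h2
          simp [pvRunsGo, pvGoA, hm]
          simpa [Nat.cast_add] using h2
      | false =>
        by_cases hm : (0 : Int) + 1 ≥ m
        · have h1 := pvRunsGo_any_true rest 1 m (by omega)
          simp [pvRunsGo, pvGoA, h1]
          left; omega
        · have h2 := ih true 1 m (by intro _; omega)
          simp at h2
          simp [pvRunsGo, pvGoA, h2]
          intro h; exact absurd h (by omega)
    | false =>
      cases k with
      | true =>
        have hn : ¬ ((n : Int) ≥ m) := by have := hk rfl; omega
        have h2 := ih false 1 m (by intro h; cases h)
        simp only [if_neg (by simp : ¬ (false : Bool) = true)] at h2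
        simp [pvRunsGo, pvGoA, hn, h2]
      | false =>
        have h2 := ih false (n + 1) m (by intro h; cases h)
        simp only [if_neg (by simp : ¬ (false : Bool) = true)] at h2
        simp [pvRunsGo, pvGoA, h2]

-- ===== VERDICT (by name: the statement is the Claim_ definition above) =====
theorem has_min_consecutive_true_py_spec : Claim_equal_has_min_consecutive_true_py := by
  intro values min_run _
  unfold Spec_has_min_consecutive_true_py has_min_consecutive_true_py has_min_consecutive_true_py_alt
  cases values with
  | nil => simp [pvRuns, pvGoA]
  | cons b rest =>
    cases b with
    | true =>
      by_cases hm : (0 : Int) + 1 ≥ min_run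
      · have h1 := pvRunsGo_any_true rest 1 min_run (by omega)
        simp [pvRuns, pvGoA, h1]
        left; omega
      · have h2 := pvMain rest true 1 min_run (by intro _; omega)
        simp at h2
        simp [pvRuns, pvGoA, h2]
        intro h; exact absurd h (by omega)
    | false =>
      have h2 := pvMain rest false 1 min_run (by intro h; cases h)
      simp only [if_neg (by simp : ¬ (false : Bool) = true)] at h2
      simp [pvRuns, pvGoA, h2]
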